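-- pv_equiv track=rewrite | github.com/rawatpranjal/survey-of-reinforcement-learning-in-economics | ch05_econ_models/sims/bus_engine_dp_vs_dqn.py | state_vector_to_index
-- ===== SOURCE A (Python) =====
-- MAX_MILEAGE_STATE = 5   # Mileage states: 0, 1, 2, 3, 4, 5 (6 levels)
--
-- NUM_MILEAGE_LEVELS = MAX_MILEAGE_STATE + 1
--
-- def state_vector_to_index(state_vector, N):
--     """Converts state vector (m1, ..., mN) to a unique integer index."""
--     if len(state_vector) != N:
--         raise ValueError(f"State vector length {len(state_vector)} != N ({N})")
--     index = 0
--     place_value = 1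
--     for i in range(N):
--         # Ensure mileage state is within bounds
--         m_i = min(max(0, state_vector[i]), MAX_MILEAGE_STATE)
--         index += m_i * place_value
--         place_value *= NUM_MILEAGE_LEVELS
--     return index
-- ===== SOURCE B (Python) =====
-- MAX_MILEAGE_STATE = 5
--
-- NUM_MILEAGE_LEVELS = MAX_MILEAGE_STATE + 1
--
-- def _encode(v):
--     """Base-6 value of the clamped digit list (least significant digit first),
--     by divide and conquer: the right half's digits carry an extra weight 6**mid,
--     so value(v) = value(v[:mid]) + 6**mid * value(v[mid:])."""
--     if not v:
--         return 0
--     if len(v) == 1: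
--         return min(max(0, v[0]), MAX_MILEAGE_STATE)
--     mid = len(v) // 2
--     return _encode(v[:mid]) + NUM_MILEAGE_LEVELS ** mid * _encode(v[mid:])
--
-- def state_vector_to_index(state_vector, N):
--     """Converts state vector (m1, ..., mN) to a unique integer index."""
--     if len(state_vector) != N:
--         raise ValueError(f"State vector length {len(state_vector)} != N ({N})")
--     return _encode(state_vector)
-- ===== Notes on version B (the rewrite author's own statement) =====
-- stated objective: alternative
-- what changed: Replaces the single forward loop maintaining (index, place_value) with a divide-and-conquer recursion: the vector is split in half and the two halves are encoded recursively, merged as left + 6**mid * right; no running power or index loop remains.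
import Mathlib
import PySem

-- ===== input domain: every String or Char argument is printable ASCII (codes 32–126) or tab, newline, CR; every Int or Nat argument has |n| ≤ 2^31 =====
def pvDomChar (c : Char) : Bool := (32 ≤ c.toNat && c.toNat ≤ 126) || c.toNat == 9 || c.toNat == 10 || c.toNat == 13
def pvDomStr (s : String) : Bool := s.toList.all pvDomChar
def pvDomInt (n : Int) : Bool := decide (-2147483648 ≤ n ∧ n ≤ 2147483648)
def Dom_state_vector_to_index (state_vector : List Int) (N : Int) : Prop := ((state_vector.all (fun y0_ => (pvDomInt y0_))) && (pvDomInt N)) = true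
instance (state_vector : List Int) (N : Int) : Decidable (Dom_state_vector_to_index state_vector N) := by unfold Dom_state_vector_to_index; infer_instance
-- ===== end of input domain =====

-- B replaces A's single forward loop with its maintained place_value by a divide-and-conquer
-- recursion (split in half, encode each half, merge as left + 6^mid * right); alternative
-- decomposition, same asymptotic cost.

-- ===== PORT A =====
-- forward loop over range(N) keeping (index, place_value); sv[i] via pyGet? (in range whenever
-- Pre_ holds, so the .getD 0 default is never used inside Pre_); the length-mismatch branch is a
-- ValueError in Python, excluded by Pre_.
def state_vector_to_index (state_vector : List Int) (N : Int) : Int :=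
  if (state_vector.length : Int) ≠ N then 0
  else
    ((PySem.List.pyRange 0 N 1).foldl
      (fun (s : Int × Int) i =>
        (s.1 + (min (max 0 ((PySem.List.pyGet? state_vector i).getD 0)) 5) * s.2, s.2 * 6))
      (0, 1)).1

-- ===== PORT B =====
-- _encode: divide and conquer. v[0] on a nonempty list is v.headD 0 (exact); the slices
-- v[:mid] / v[mid:] with mid = len(v)//2 ≥ 0 are exactly take/drop
-- (PySem.List.slice_to_natCast / slice_from_natCast); 6 ** mid is (6:Int)^mid.
def pvEncode (v : List Int) : Int :=
  if _h0 : v = [] then 0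
  else if _h1 : v.length = 1 then min (max 0 (v.headD 0)) 5
  else
    pvEncode (v.take (v.length / 2)) + 6 ^ (v.length / 2) * pvEncode (v.drop (v.length / 2))
termination_by v.length
decreasing_by
  · simp only [List.length_take]
    have : v.length ≠ 0 := by simpa [List.length_eq_zero_iff] using _h0
    omega
  · simp only [List.length_drop]
    have : v.length ≠ 0 := by simpa [List.length_eq_zero_iff] using _h0
    omega

-- same length check (ValueError in Python, excluded by Pre_), then the recursive encoder.
def state_vector_to_index_alt (state_vector : List Int) (N : Int) : Int :=
  if (state_vector.length : Int) ≠ N then 0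
  else pvEncode state_vector

-- ===== PRECONDITION & SPEC =====
-- A raises ValueError iff len(state_vector) != N; Pre_ admits exactly the inputs where A returns.
def Pre_state_vector_to_index (state_vector : List Int) (N : Int) : Prop :=
  (state_vector.length : Int) = N
instance (state_vector : List Int) (N : Int) : Decidable (Pre_state_vector_to_index state_vector N) := by unfold Pre_state_vector_to_index; infer_instance
def pvWitness_state_vector_to_index : List Int × Int := ([1, 7, -2], 3)

def Spec_state_vector_to_index (state_vector : List Int) (N : Int) (out : Int) : Prop := out = state_vector_to_index_alt state_vector N
instance (state_vector : List Int) (N : Int) (out : Int) : Decidable (Spec_state_vector_to_index state_vector N out) := by unfold Spec_state_vector_to_index; infer_instance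

-- ===== CLAIM (what is proved, stated in full; the proofs are below) =====
def Claim_equal_state_vector_to_index : Prop := ∀ (state_vector : List Int) (N : Int), Dom_state_vector_to_index state_vector N → Pre_state_vector_to_index state_vector N → Spec_state_vector_to_index state_vector N (state_vector_to_index state_vector N)

-- ===== LEMMAS AND PROOFS =====

-- proof-side reference value: right fold (Horner) of the clamped digits.
def pvFoldrEnc (v : List Int) : Int :=
  v.foldr (fun m acc => min (max 0 m) 5 + 6 * acc) 0

theorem pvFoldrEnc_append (xs ys : List Int) :
    pvFoldrEnc (xs ++ ys) = pvFoldrEnc xs + 6 ^ xs.length * pvFoldrEnc ys := by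
  induction xs with
  | nil => simp [pvFoldrEnc]
  | cons x xs ih =>
    simp only [pvFoldrEnc, List.cons_append, List.foldr_cons] at *
    rw [ih, List.length_cons, pow_succ]
    ring

theorem pvEncode_eq_foldr (v : List Int) : pvEncode v = pvFoldrEnc v := by
  induction v using pvEncode.induct with
  | case1 => simp [pvEncode, pvFoldrEnc]
  | case2 v h0 h1 =>
    obtain ⟨m, hm⟩ := List.length_eq_one_iff.mp h1
    subst hm
    simp [pvEncode, pvFoldrEnc]
  | case3 v h0 h1 ih1 ih2 =>
    rw [pvEncode]
    rw [dif_neg h0, dif_neg h1, ih1, ih2]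
    have hmid : (v.take (v.length / 2)).length = v.length / 2 := by
      simp [List.length_take]; omega
    calc pvFoldrEnc (v.take (v.length / 2)) + 6 ^ (v.length / 2) * pvFoldrEnc (v.drop (v.length / 2))
        = pvFoldrEnc (v.take (v.length / 2)) + 6 ^ (v.take (v.length / 2)).length * pvFoldrEnc (v.drop (v.length / 2)) := by rw [hmid]
      _ = pvFoldrEnc (v.take (v.length / 2) ++ v.drop (v.length / 2)) := (pvFoldrEnc_append _ _).symm
      _ = pvFoldrEnc v := by rw [List.take_append_drop]

-- A's loop from (0,1): after n steps the pair is (Σ_{i<n} g i · 6^i, 6^n).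
theorem pvA_loop (g : Int → Int) (n : Nat) :
    (PySem.List.pyRange 0 (n : Int) 1).foldl
      (fun (s : Int × Int) i => (s.1 + g i * s.2, s.2 * 6)) (0, 1)
    = (∑ i ∈ Finset.range n, g i * 6 ^ i, 6 ^ n) := by
  induction n with
  | zero => simp
  | succ n ih =>
    have h : ((n : Int) + 1) = ((n + 1 : Nat) : Int) := by push_cast; ring
    rw [← h, PySem.List.pyRange_one_succ_right (by positivity), List.foldl_append, ih]
    simp [Finset.sum_range_succ, pow_succ]

-- A's positional sum over the list's entries equals the right fold.
theorem pvSum_eq_foldr (l : List Int) :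
    (∑ i ∈ Finset.range l.length,
        (min (max 0 ((PySem.List.pyGet? l (i : Int)).getD 0)) 5) * 6 ^ i)
    = pvFoldrEnc l := by
  induction l with
  | nil => simp [pvFoldrEnc]
  | cons x xs ih =>
    rw [List.length_cons, Finset.sum_range_succ']
    have h1 : ∀ i ∈ Finset.range xs.length,
        (min (max 0 ((PySem.List.pyGet? (x::xs) ((i + 1 : Nat) : Int)).getD 0)) 5) * 6 ^ (i+1)
        = 6 * ((min (max 0 ((PySem.List.pyGet? xs ((i : Nat) : Int)).getD 0)) 5) * 6 ^ i) := by
      intro i _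
      simp only [Nat.cast_add, Nat.cast_one, PySem.List.pyGet?_cons_succ,
        PySem.List.pyGet?_natCast, pow_succ]
      ring
    rw [Finset.sum_congr rfl h1, ← Finset.mul_sum]
    rw [pvFoldrEnc, List.foldr_cons, ← pvFoldrEnc, ← ih]
    simp [pysem]
    ring

-- ===== VERDICT (by name: the statement is the Claim_ definition above) =====
theorem state_vector_to_index_spec : Claim_equal_state_vector_to_index := by
  intro sv N _ hpre
  unfold Spec_state_vector_to_index state_vector_to_index state_vector_to_index_alt
  unfold Pre_state_vector_to_index at hpre
  subst hpre
  simp only [ne_eq, not_true_eq_false, if_neg, not_false_eq_true]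
  rw [pvA_loop (fun i => min (max 0 ((PySem.List.pyGet? sv i).getD 0)) 5) sv.length]
  simp only []
  rw [pvSum_eq_foldr, pvEncode_eq_foldr]
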